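-- pv_equiv track=rewrite | github.com/jiyeonkim26/markdown-compiler | markdown_compiler/util/line_functions.py | compile_strikethrough
-- ===== SOURCE A (Python) =====
-- def compile_strikethrough(line):
--     '''
--     Convert "~~strikethrough~~" to "<ins>strikethrough</ins>".
--
--     HINT:
--     The strikethrough annotations are very similar to implement as the italic function.
--     The difference is that there are two delimiting characters instead of one.
--     This will require carefully thinking about the range of your for loop and all of your list indexing.
--
--     >>> compile_strikethrough('~~This is strikethrough!~~ This is not strikethrough.')
--     '<ins>This is strikethrough!</ins> This is not strikethrough.'
--     >>> compile_strikethrough('~~This is strikethrough!~~')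
--     '<ins>This is strikethrough!</ins>'
--     >>> compile_strikethrough('This is ~~strikethrough~~!')
--     'This is <ins>strikethrough</ins>!'
--     >>> compile_strikethrough('This is not ~~strikethrough!')
--     'This is not ~~strikethrough!'
--     >>> compile_strikethrough('~~')
--     '~~'
--     '''
--     if line.count('~~') < 2:
--         return line
--
--     accumulator = ''
--     has_opened = False
--     i = 0
--
--     while i < len(line):
--         if line[i:i + 2] == '~~':
--             if not has_opened:
--                 accumulator += '<ins>'
--                 has_opened = True
--             else:
--                 accumulator += '</ins>'
--                 has_opened = False
--             i += 2
--         else: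
--             accumulator += line[i]
--             i += 1
--     return accumulator
-- ===== SOURCE B (Python) =====
-- def compile_strikethrough(line):
--     if line.count('~~') < 2:
--         return line
--     parts = line.split('~~')
--     result = parts[0]
--     for idx, part in enumerate(parts[1:]):
--         result += ('<ins>' if idx % 2 == 0 else '</ins>') + part
--     return result
-- ===== Notes on version B (the rewrite author's own statement) =====
-- stated objective: simpler
-- what changed: Replaces A's index-walking while loop that compares line[i:i+2] at every position with a single split('~~') followed by rejoining the segments with alternating <ins>/</ins> tags.
import Mathlib
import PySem

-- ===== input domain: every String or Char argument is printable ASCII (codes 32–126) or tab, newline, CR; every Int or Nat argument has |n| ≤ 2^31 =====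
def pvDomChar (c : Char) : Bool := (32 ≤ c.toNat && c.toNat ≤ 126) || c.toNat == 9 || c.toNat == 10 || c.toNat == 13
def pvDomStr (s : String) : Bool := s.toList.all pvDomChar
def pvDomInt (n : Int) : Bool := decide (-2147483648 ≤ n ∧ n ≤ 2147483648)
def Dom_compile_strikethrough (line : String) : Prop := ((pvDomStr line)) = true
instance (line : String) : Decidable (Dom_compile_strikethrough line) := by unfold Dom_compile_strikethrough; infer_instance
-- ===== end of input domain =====

-- B replaces A's character-position scan with a split-on-'~~' pass that alternates
-- opening/closing tags over the segments (objective: simpler).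

-- ===== PORT A =====
-- A's while loop: at each position compare line[i:i+2] with '~~'; on a match emit the
-- alternating tag and advance by 2, otherwise copy one character and advance by 1.
def pvScanA : List Char → Bool → List Char
  | c1 :: c2 :: rest, has_opened =>
    if c1 = '~' ∧ c2 = '~' then
      (if has_opened then "</ins>".toList else "<ins>".toList) ++ pvScanA rest (!has_opened)
    else
      c1 :: pvScanA (c2 :: rest) has_opened
  | [c], _ => [c]          -- line[i:i+2] is a single char here, never '~~'
  | [], _ => []

def compile_strikethrough (line : String) : String :=
  if PySem.Str.count line "~~" < 2 then line
  else String.ofList (pvScanA line.toList false)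

-- ===== PORT B =====
def compile_strikethrough_alt (line : String) : String :=
  if PySem.Str.count line "~~" < 2 then line
  else
    match PySem.Chars.splitOn line.toList ['~', '~'] with
    | [] => line          -- unreachable: split always yields at least one part
    | p0 :: rest =>
      String.ofList ((PySem.List.enumerate rest).foldl
        (fun acc ip =>
          acc ++ (if ip.1 % 2 == 0 then "<ins>".toList else "</ins>".toList) ++ ip.2) p0)

-- ===== PRECONDITION & SPEC =====
def Spec_compile_strikethrough (line : String) (out : String) : Prop := out = compile_strikethrough_alt line
instance (line : String) (out : String) : Decidable (Spec_compile_strikethrough line out) := by unfold Spec_compile_strikethrough; infer_instance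

-- ===== CLAIM (what is proved, stated in full; the proofs are below) =====
def Claim_equal_compile_strikethrough : Prop := ∀ (line : String), Dom_compile_strikethrough line → Spec_compile_strikethrough line (compile_strikethrough line)

-- ===== LEMMAS AND PROOFS =====

-- clean structural characterisation of splitting on '~~'
def pvSplitTT : List Char → List (List Char)
  | c1 :: c2 :: rest =>
    if c1 = '~' ∧ c2 = '~' then [] :: pvSplitTT rest
    else
      match pvSplitTT (c2 :: rest) with
      | p :: ps => (c1 :: p) :: ps
      | [] => [[c1]]
  | [c] => [[c]]
  | [] => [[]]

theorem pvSplitTT_ne_nil (l : List Char) : pvSplitTT l ≠ [] := by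
  match l with
  | [] => simp [pvSplitTT]
  | [c] => simp [pvSplitTT]
  | c1 :: c2 :: rest =>
    unfold pvSplitTT
    split_ifs with h
    · simp
    · cases hs : pvSplitTT (c2 :: rest) <;> simp

theorem pvSplitOn_go_eq (fuel : Nat) (l cur : List Char) (acc : List (List Char))
    (h : l.length < fuel) :
    PySem.Chars.splitOn.go ['~', '~'] fuel l cur acc =
      acc.reverse ++
        (match pvSplitTT l with
         | p :: ps => (cur.reverse ++ p) :: ps
         | [] => [cur.reverse]) := by
  induction fuel generalizing l cur acc with
  | zero => omega
  | succ n ih =>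
    match l with
    | [] => simp [PySem.Chars.splitOn.go, pvSplitTT]
    | [c] =>
      have hpre : List.isPrefixOf ['~', '~'] [c] = false := by
        simp [List.isPrefixOf]
      simp only [PySem.Chars.splitOn.go, hpre]
      rw [ih [] (c :: cur) acc (by simp at h ⊢; omega)]
      simp [pvSplitTT]
    | c1 :: c2 :: rest =>
      by_cases h2 : c1 = '~' ∧ c2 = '~'
      · obtain ⟨rfl, rfl⟩ := h2
        have hpre : List.isPrefixOf ['~', '~'] ('~' :: '~' :: rest) = true := by
          simp [List.isPrefixOf]
        simp only [PySem.Chars.splitOn.go, hpre, if_pos]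
        have hd : List.drop (['~', '~'].length) ('~' :: '~' :: rest) = rest := rfl
        rw [hd, ih rest [] (cur.reverse :: acc) (by simp at h ⊢; omega)]
        cases hs : pvSplitTT rest with
        | nil => exact absurd hs (pvSplitTT_ne_nil rest)
        | cons p ps =>
          simp [pvSplitTT, hs]
      · have hpre : List.isPrefixOf ['~', '~'] (c1 :: c2 :: rest) = false := by
          have hno : ¬('~' = c1 ∧ '~' = c2) := by
            rintro ⟨ha, hb⟩; exact h2 ⟨ha.symm, hb.symm⟩
          simpa [List.isPrefixOf] using hno
        simp only [PySem.Chars.splitOn.go, hpre]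
        rw [ih (c2 :: rest) (c1 :: cur) acc (by simp at h ⊢; omega)]
        cases hs : pvSplitTT (c2 :: rest) with
        | nil => exact absurd hs (pvSplitTT_ne_nil _)
        | cons p ps =>
          simp [pvSplitTT, h2, hs]

theorem pvSplitOn_eq (l : List Char) :
    PySem.Chars.splitOn l ['~', '~'] = pvSplitTT l := by
  unfold PySem.Chars.splitOn
  rw [pvSplitOn_go_eq (l.length + 1) l [] [] (by omega)]
  cases hs : pvSplitTT l with
  | nil => exact absurd hs (pvSplitTT_ne_nil l)
  | cons p ps => simp

-- the alternating-tag interleaving of the tail segments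
def pvWeave : List (List Char) → Bool → List Char
  | [], _ => []
  | p :: ps, opened =>
    (if opened then "</ins>".toList else "<ins>".toList) ++ p ++ pvWeave ps (!opened)

theorem pvScanA_eq_weave (l : List Char) (opened : Bool) :
    pvScanA l opened =
      (match pvSplitTT l with
       | p :: ps => p ++ pvWeave ps opened
       | [] => []) := by
  match l with
  | [] => simp [pvScanA, pvSplitTT, pvWeave]
  | [c] => simp [pvScanA, pvSplitTT, pvWeave]
  | c1 :: c2 :: rest =>
    by_cases h2 : c1 = '~' ∧ c2 = '~'
    · obtain ⟨rfl, rfl⟩ := h2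
      have ih := pvScanA_eq_weave rest (!opened)
      cases hs : pvSplitTT rest with
      | nil => exact absurd hs (pvSplitTT_ne_nil rest)
      | cons p ps =>
        simp only [pvScanA, pvSplitTT, hs] at ih ⊢
        simp [pvWeave, ih]
    · have ih := pvScanA_eq_weave (c2 :: rest) opened
      cases hs : pvSplitTT (c2 :: rest) with
      | nil => exact absurd hs (pvSplitTT_ne_nil _)
      | cons p ps =>
        simp only [pvScanA, pvSplitTT, if_neg h2, hs] at ih ⊢
        simp [ih]

theorem pvFoldl_enumerate_weave (ps : List (List Char)) (n : Int) (acc : List Char)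
    (hn : 0 ≤ n) :
    (PySem.List.enumerate ps n).foldl
        (fun acc ip =>
          acc ++ (if ip.1 % 2 == 0 then "<ins>".toList else "</ins>".toList) ++ ip.2) acc =
      acc ++ pvWeave ps (n % 2 == 1) := by
  induction ps generalizing n acc with
  | nil => simp [PySem.List.enumerate, pvWeave]
  | cons p ps ih =>
    simp only [PySem.List.enumerate, List.foldl_cons]
    rw [ih (n + 1) _ (by omega)]
    have h2 : n % 2 = 0 ∨ n % 2 = 1 := Int.emod_two_eq n
    rcases h2 with h | h <;>
      simp [pvWeave, h, List.append_assoc, show (n + 1) % 2 = (n % 2 + 1) % 2 from by omega]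

-- ===== VERDICT (by name: the statement is the Claim_ definition above) =====
theorem compile_strikethrough_spec : Claim_equal_compile_strikethrough := by
  intro line _
  unfold Spec_compile_strikethrough compile_strikethrough compile_strikethrough_alt
  split_ifs with h
  · rfl
  · rw [pvSplitOn_eq]
    cases hs : pvSplitTT line.toList with
    | nil => exact absurd hs (pvSplitTT_ne_nil _)
    | cons p ps =>
      have hw : pvScanA line.toList false = p ++ pvWeave ps false := by
        have := pvScanA_eq_weave line.toList false
        rw [hs] at this; exact this
      rw [hw]
      show String.ofList (p ++ pvWeave ps false) =
        String.ofList ((PySem.List.enumerate ps).foldl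
          (fun acc ip =>
            acc ++ (if ip.1 % 2 == 0 then "<ins>".toList else "</ins>".toList) ++ ip.2) p)
      rw [pvFoldl_enumerate_weave ps 0 p (by omega)]
      rfl
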